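-- pv_equiv track=rewrite | github.com/git-scarrow/tool-capability-protocol | tcp/harness/normalize.py | _derive_legacy_risk_level
-- ===== SOURCE A (Python) =====
-- def _derive_legacy_risk_level(security_flags: int) -> str:
--     """Derive the risk label from the v2 security bit field."""
--     risk_bits = [
--         (4, "critical"),
--         (3, "high_risk"),
--         (2, "medium_risk"),
--         (1, "low_risk"),
--         (0, "safe"),
--     ]
--     for bit, label in risk_bits:
--         if security_flags & (1 << bit):
--             return label
--     return "unknown"
-- ===== SOURCE B (Python) =====
-- _RISK_LABELS = ["safe", "low_risk", "medium_risk", "high_risk", "critical"]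
--
-- def _derive_legacy_risk_level(security_flags: int) -> str:
--     """Derive the risk label from the v2 security bit field."""
--     m = security_flags & 0b11111
--     if m == 0:
--         return "unknown"
--     return _RISK_LABELS[m.bit_length() - 1]
-- ===== Notes on version B (the rewrite author's own statement) =====
-- stated objective: simpler
-- what changed: Replaced the descending per-bit loop over (bit, label) pairs with masking to the low five bits and a direct table lookup at the highest set bit index (bit_length minus one).
import Mathlib
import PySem

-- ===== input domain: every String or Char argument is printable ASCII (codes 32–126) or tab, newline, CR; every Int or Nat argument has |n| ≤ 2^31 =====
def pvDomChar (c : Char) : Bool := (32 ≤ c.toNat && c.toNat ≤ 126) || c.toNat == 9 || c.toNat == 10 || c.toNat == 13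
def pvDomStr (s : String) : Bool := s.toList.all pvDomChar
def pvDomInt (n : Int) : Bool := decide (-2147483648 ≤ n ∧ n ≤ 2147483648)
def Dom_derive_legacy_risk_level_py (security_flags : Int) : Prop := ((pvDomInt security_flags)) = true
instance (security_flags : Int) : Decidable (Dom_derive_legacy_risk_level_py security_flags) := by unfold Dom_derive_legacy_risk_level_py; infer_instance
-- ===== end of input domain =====

-- B replaces A's descending per-bit scan by masking to 5 bits and indexing a label table with the
-- highest set bit (bit_length - 1): simpler/idiomatic, same exact result.

-- ===== PORT A =====
-- the for-loop with early return over the literal (bit, label) list is List.find?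
def derive_legacy_risk_level_py (security_flags : Int) : String :=
  let risk_bits : List (Nat × String) :=
    [(4, "critical"), (3, "high_risk"), (2, "medium_risk"), (1, "low_risk"), (0, "safe")]
  match risk_bits.find? (fun p => PySem.Int.band security_flags ((1 <<< p.1 : Nat) : Int) ≠ 0) with
  | some p => p.2
  | none => "unknown"

-- ===== PORT B =====
def derive_legacy_risk_level_py_alt (security_flags : Int) : String :=
  let m := PySem.Int.band security_flags 31
  if m = 0 then "unknown"
  else ["safe", "low_risk", "medium_risk", "high_risk", "critical"].getD
         (PySem.Int.bitLength m - 1) "unknown"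

-- ===== PRECONDITION & SPEC =====
def Spec_derive_legacy_risk_level_py (security_flags : Int) (out : String) : Prop := out = derive_legacy_risk_level_py_alt security_flags
instance (security_flags : Int) (out : String) : Decidable (Spec_derive_legacy_risk_level_py security_flags out) := by unfold Spec_derive_legacy_risk_level_py; infer_instance

-- ===== CLAIM (what is proved, stated in full; the proofs are below) =====
def Claim_equal_derive_legacy_risk_level_py : Prop := ∀ (security_flags : Int), Dom_derive_legacy_risk_level_py security_flags → Spec_derive_legacy_risk_level_py security_flags (derive_legacy_risk_level_py security_flags)

-- ===== LEMMAS AND PROOFS =====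

-- masking with 31 first does not change an AND against a 5-bit constant
theorem nat_and_mod32 (c n : Nat) (hc : c &&& 31 = c) : n &&& c = (n % 32) &&& c := by
  have h31 : n &&& 31 = n % 32 := by
    have := Nat.and_two_pow_sub_one_eq_mod n 5
    norm_num at this; omega
  calc n &&& c = n &&& (31 &&& c) := by rw [Nat.and_comm 31 c, hc]
    _ = (n &&& 31) &&& c := (Nat.and_assoc n 31 c).symm
    _ = (n % 32) &&& c := by rw [h31]

-- band against a 5-bit constant depends only on the low 5 bits, nonnegative case
theorem band_pos (f : Int) (hf : 0 ≤ f) (c : Nat) (hc : c &&& 31 = c) :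
    PySem.Int.band f (c : Int) = ((f.toNat % 32 &&& c : Nat) : Int) := by
  have : (0:Int) ≤ (c : Int) := Int.natCast_nonneg c
  simp [PySem.Int.band, hf, this, ← nat_and_mod32 c f.toNat hc]

-- band against a 5-bit constant depends only on the low 5 bits, negative case
theorem band_neg (f : Int) (hf : ¬ 0 ≤ f) (c : Nat) (hc : c &&& 31 = c) :
    PySem.Int.band f (c : Int) = ((c - ((-f - 1).toNat % 32 &&& c) : Nat) : Int) := by
  have : (0:Int) ≤ (c : Int) := Int.natCast_nonneg c
  simp only [PySem.Int.band, hf, this, if_false, if_true, Int.toNat_natCast]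
  rw [Nat.and_comm c ((-f-1).toNat), nat_and_mod32 c ((-f-1).toNat) hc,
      Nat.and_comm ((-f-1).toNat % 32) c, Nat.and_comm c ((-f-1).toNat % 32)]

-- both ports agree for every integer (the claim then specialises to Dom)
theorem ports_agree (f : Int) :
    derive_legacy_risk_level_py f = derive_legacy_risk_level_py_alt f := by
  unfold derive_legacy_risk_level_py derive_legacy_risk_level_py_alt
  rw [show ((31:Int) = ((31:Nat):Int)) from rfl]
  simp only [List.find?, show (1 <<< 4 : Nat) = 16 from rfl, show (1 <<< 3 : Nat) = 8 from rfl,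
    show (1 <<< 2 : Nat) = 4 from rfl, show (1 <<< 1 : Nat) = 2 from rfl,
    show (1 <<< 0 : Nat) = 1 from rfl]
  by_cases hf : 0 ≤ f
  · rw [band_pos f hf 16 (by decide), band_pos f hf 8 (by decide), band_pos f hf 4 (by decide),
        band_pos f hf 2 (by decide), band_pos f hf 1 (by decide), band_pos f hf 31 (by decide)]
    have hm : f.toNat % 32 < 32 := Nat.mod_lt _ (by omega)
    generalize f.toNat % 32 = m at hm
    interval_cases m <;> decide
  · rw [band_neg f hf 16 (by decide), band_neg f hf 8 (by decide), band_neg f hf 4 (by decide),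
        band_neg f hf 2 (by decide), band_neg f hf 1 (by decide), band_neg f hf 31 (by decide)]
    have hm : (-f - 1).toNat % 32 < 32 := Nat.mod_lt _ (by omega)
    generalize (-f - 1).toNat % 32 = m at hm
    interval_cases m <;> decide

-- ===== VERDICT (by name: the statement is the Claim_ definition above) =====
theorem derive_legacy_risk_level_py_spec : Claim_equal_derive_legacy_risk_level_py := by
  intro f _
  unfold Spec_derive_legacy_risk_level_py
  exact ports_agree f
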